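-- pv_equiv track=rewrite | github.com/fabranx/AdventOfCode | 2024/event12/event12.py | trova_gruppi_simboli
-- ===== SOURCE A (Python) =====
-- def trova_gruppi_simboli(matrice):
--     n = len(matrice)  # Dimensione della matrice quadrata
--     visitato = [[False] * n for _ in range(n)]  # Matrice per tenere traccia dei simboli visitati
--
--     # Direzioni per spostarsi orizzontalmente e verticalmente
--     direzioni = [(0, 1), (1, 0), (0, -1), (-1, 0)]  # Destra, Giù, Sinistra, Su
--
--     def dfs(x, y, simbolo, gruppo):
--         """Esegue DFS per trovare simboli contigui."""
--         visitato[x][y] = True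
--         gruppo.append((x, y))
--
--         for dx, dy in direzioni:
--             nx, ny = x + dx, y + dy
--             if 0 <= nx < n and 0 <= ny < n and not visitato[nx][ny] and matrice[nx][ny] == simbolo:
--                 dfs(nx, ny, simbolo, gruppo)
--
--     gruppi = []
--
--     # Scansione della matrice
--     for i in range(n):
--         for j in range(n):
--             if not visitato[i][j]:  # Se il simbolo non è stato ancora visitato
--                 gruppo_corrente = []
--                 dfs(i, j, matrice[i][j], gruppo_corrente)
--                 if gruppo_corrente:  # Aggiungiamo il gruppo trovato
--                     gruppi.append((matrice[i][j], gruppo_corrente))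
--
--     return gruppi
-- ===== SOURCE B (Python) =====
-- def trova_gruppi_simboli(matrice):
--     n = len(matrice)
--     visitato = set()
--     gruppi = []
--     for k in range(n * n):
--         i, j = divmod(k, n)
--         if (i, j) in visitato:
--             continue
--         simbolo = matrice[i][j]
--         gruppo = []
--         stack = [(i, j)]
--         while stack:
--             x, y = stack.pop()
--             if (x, y) in visitato:
--                 continue
--             if 0 <= x < n and 0 <= y < n and matrice[x][y] == simbolo:
--                 visitato.add((x, y))
--                 gruppo.append((x, y))
--                 stack.extend(((x - 1, y), (x, y - 1), (x + 1, y), (x, y + 1)))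
--         gruppi.append((simbolo, gruppo))
--     return gruppi
-- ===== Notes on version B (the rewrite author's own statement) =====
-- stated objective: alternative
-- what changed: A's recursive dfs over a 2D boolean visited matrix with a nested i,j scan is replaced by a single flat loop over k in range(n*n) with divmod, a visited SET of coordinate tuples, and an iterative explicit-stack DFS (visited checked at pop, neighbours pushed in reversed direction order), producing the same pre-order group lists without recursion.
import Mathlib
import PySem

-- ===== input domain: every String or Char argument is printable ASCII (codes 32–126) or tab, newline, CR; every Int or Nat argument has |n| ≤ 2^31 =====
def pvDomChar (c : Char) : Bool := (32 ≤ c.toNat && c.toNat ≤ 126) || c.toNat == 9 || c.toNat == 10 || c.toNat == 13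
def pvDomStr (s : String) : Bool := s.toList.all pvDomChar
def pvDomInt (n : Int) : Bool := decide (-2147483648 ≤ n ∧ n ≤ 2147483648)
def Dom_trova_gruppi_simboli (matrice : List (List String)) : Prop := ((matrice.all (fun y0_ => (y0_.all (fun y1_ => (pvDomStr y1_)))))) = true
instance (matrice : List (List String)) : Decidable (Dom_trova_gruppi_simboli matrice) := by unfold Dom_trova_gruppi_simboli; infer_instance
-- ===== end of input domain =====

-- B replaces A's recursive dfs over a 2D boolean visited matrix and nested i,j scan by a single
-- flat loop over k in range(n*n) with divmod, a visited SET of coordinate pairs, and an iterative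
-- explicit-stack DFS (visited checked at pop, neighbours pushed in reversed direction order);
-- same pre-order output; objective: alternative.

-- ===== PORT A =====
def pvVget (v : List (List Bool)) (x y : Int) : Bool := (v.getD x.toNat []).getD y.toNat false

def pvVset (v : List (List Bool)) (x y : Int) : List (List Bool) :=
  v.set x.toNat ((v.getD x.toNat []).set y.toNat true)

-- matrix cell access (both programs only read in-range nonnegative cells on Pre_)
def pvMget (m : List (List String)) (x y : Int) : String := (m.getD x.toNat []).getD y.toNat ""

def pvDirs : List (Int × Int) := [(0, 1), (1, 0), (0, -1), (-1, 0)]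

-- A's recursive dfs; the fuel nn*nn+1 strictly exceeds the recursion depth (each nested call
-- marks a fresh cell of the nn×nn visited matrix), so the 0-fuel branch is never reached.
def dfsA (m : List (List String)) (n : Int) (s : String) :
    Nat → Int → Int → List (List Bool) → List (Int × Int) → List (List Bool) × List (Int × Int)
  | 0, _, _, v, g => (v, g)
  | f + 1, x, y, v, g =>
      pvDirs.foldl (fun st d =>
        if (0 ≤ x + d.1 ∧ x + d.1 < n ∧ 0 ≤ y + d.2 ∧ y + d.2 < n) ∧
            pvVget st.1 (x + d.1) (y + d.2) = false ∧ pvMget m (x + d.1) (y + d.2) = s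
        then dfsA m n s f (x + d.1) (y + d.2) st.1 st.2
        else st)
        (pvVset v x y, g ++ [(x, y)])

def trova_gruppi_simboli (matrice : List (List String)) : List (String × (List (Int × Int))) :=
  let nn := matrice.length
  let n : Int := (nn : Int)
  ((List.range nn).foldl (fun st (i : Nat) =>
      (List.range nn).foldl (fun st (j : Nat) =>
        if pvVget st.1 (i : Int) (j : Int) = false then
          let r := dfsA matrice n (pvMget matrice (i : Int) (j : Int)) (nn * nn + 1)
                     (i : Int) (j : Int) st.1 []
          (r.1, if r.2 = [] then st.2 else st.2 ++ [(pvMget matrice (i : Int) (j : Int), r.2)])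
        else st) st)
    (List.replicate nn (List.replicate nn false), ([] : List (String × List (Int × Int))))).2

-- ===== PORT B =====
-- B's while-loop over the explicit stack, with a visited Set of coordinate pairs; every pop
-- consumes 1 fuel and each of the ≤ nn*nn markings pushes 4 cells, so fuel 4*nn*nn+1 strictly
-- exceeds the number of iterations.
def loopB (m : List (List String)) (n : Int) (s : String) :
    Nat → List (Int × Int) → PySem.Set (Int × Int) → List (Int × Int) →
      PySem.Set (Int × Int) × List (Int × Int)
  | 0, _, vis, g => (vis, g)
  | _ + 1, [], vis, g => (vis, g)
  | f + 1, (x, y) :: stack, vis, g =>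
      if (x, y) ∈ vis then loopB m n s f stack vis g
      else if 0 ≤ x ∧ x < n ∧ 0 ≤ y ∧ y < n ∧ pvMget m x y = s then
        loopB m n s f ((x, y + 1) :: (x + 1, y) :: (x, y - 1) :: (x - 1, y) :: stack)
          (PySem.Set.add vis (x, y)) (g ++ [(x, y)])
      else loopB m n s f stack vis g

-- divmod(k, n) ported as floordiv/mod: the loop body only runs when 0 ≤ k and 0 < n, where both are exact
def trova_gruppi_simboli_alt (matrice : List (List String)) : List (String × (List (Int × Int))) :=
  let n : Int := (matrice.length : Int)
  ((PySem.List.pyRange 0 (n * n) 1).foldl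
    (fun st k =>
      let i := PySem.Int.floordiv k n
      let j := PySem.Int.mod k n
      if (i, j) ∈ st.1 then st
      else
        let r := loopB matrice n (pvMget matrice i j)
                   (4 * matrice.length * matrice.length + 1) [(i, j)] st.1 []
        (r.1, st.2 ++ [(pvMget matrice i j, r.2)]))
    ((PySem.Set.empty : PySem.Set (Int × Int)), ([] : List (String × List (Int × Int))))).2

-- ===== PRECONDITION & SPEC =====
-- Pre_: every row at least as long as the number of rows — exactly where Python A's
-- matrice[i][j]/matrice[nx][ny] accesses (i,j < len(matrice)) return instead of raising IndexError.
def Pre_trova_gruppi_simboli (matrice : List (List String)) : Prop :=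
  ∀ r ∈ matrice, matrice.length ≤ r.length
instance (matrice : List (List String)) : Decidable (Pre_trova_gruppi_simboli matrice) := by
  unfold Pre_trova_gruppi_simboli; infer_instance

def pvWitness_trova_gruppi_simboli : List (List String) := [["a", "a"], ["a", "b"]]

def Spec_trova_gruppi_simboli (matrice : List (List String)) (out : List (String × (List (Int × Int)))) : Prop := out = trova_gruppi_simboli_alt matrice
instance (matrice : List (List String)) (out : List (String × (List (Int × Int)))) : Decidable (Spec_trova_gruppi_simboli matrice out) := by unfold Spec_trova_gruppi_simboli; infer_instance

-- ===== CLAIM (what is proved, stated in full; the proofs are below) =====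
def Claim_equal_trova_gruppi_simboli : Prop := ∀ (matrice : List (List String)), Dom_trova_gruppi_simboli matrice → Pre_trova_gruppi_simboli matrice → Spec_trova_gruppi_simboli matrice (trova_gruppi_simboli matrice)

-- ===== LEMMAS AND PROOFS =====

-- number of unvisited cells of A's matrix: the measure all fuel bounds are stated against
def pvCnt (v : List (List Bool)) : Nat := (v.map (List.count false)).sum

-- well-formed visited matrix: nn rows of length nn
def pvVOK (nn : Nat) (v : List (List Bool)) : Prop := v.length = nn ∧ ∀ r ∈ v, r.length = nn

-- the coupling between A's boolean matrix and B's visited set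
def pvRel (nn : Nat) (v : List (List Bool)) (S : PySem.Set (Int × Int)) : Prop :=
  ∀ x y : Int, ((x, y) ∈ S) ↔
    (0 ≤ x ∧ x < (nn : Int) ∧ 0 ≤ y ∧ y < (nn : Int) ∧ pvVget v x y = true)

-- the dfs inner for-loop over a direction list, with the fuel its recursive calls get
def goA (m : List (List String)) (n : Int) (s : String) (f : Nat) (ds : List (Int × Int))
    (x y : Int) (st : List (List Bool) × List (Int × Int)) :
    List (List Bool) × List (Int × Int) :=
  ds.foldl (fun st d =>
    if (0 ≤ x + d.1 ∧ x + d.1 < n ∧ 0 ≤ y + d.2 ∧ y + d.2 < n) ∧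
        pvVget st.1 (x + d.1) (y + d.2) = false ∧ pvMget m (x + d.1) (y + d.2) = s
    then dfsA m n s f (x + d.1) (y + d.2) st.1 st.2
    else st) st

theorem dfsA_succ (m : List (List String)) (n : Int) (s : String) (f : Nat) (x y : Int)
    (v : List (List Bool)) (g : List (Int × Int)) :
    dfsA m n s (f + 1) x y v g = goA m n s f pvDirs x y (pvVset v x y, g ++ [(x, y)]) := rfl

theorem goA_nil (m : List (List String)) (n : Int) (s : String) (f : Nat) (x y : Int)
    (st : List (List Bool) × List (Int × Int)) : goA m n s f [] x y st = st := rfl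

theorem goA_cons (m : List (List String)) (n : Int) (s : String) (f : Nat) (d : Int × Int)
    (ds : List (Int × Int)) (x y : Int) (st : List (List Bool) × List (Int × Int)) :
    goA m n s f (d :: ds) x y st =
      goA m n s f ds x y
        (if (0 ≤ x + d.1 ∧ x + d.1 < n ∧ 0 ≤ y + d.2 ∧ y + d.2 < n) ∧
            pvVget st.1 (x + d.1) (y + d.2) = false ∧ pvMget m (x + d.1) (y + d.2) = s
         then dfsA m n s f (x + d.1) (y + d.2) st.1 st.2
         else st) := rfl

theorem loopB_nil (m : List (List String)) (n : Int) (s : String) (f : Nat)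
    (vis : PySem.Set (Int × Int)) (g : List (Int × Int)) : loopB m n s f [] vis g = (vis, g) := by
  cases f <;> rfl

theorem loopB_cons (m : List (List String)) (n : Int) (s : String) (f : Nat) (x y : Int)
    (stack : List (Int × Int)) (vis : PySem.Set (Int × Int)) (g : List (Int × Int)) :
    loopB m n s (f + 1) ((x, y) :: stack) vis g =
      if (x, y) ∈ vis then loopB m n s f stack vis g
      else if 0 ≤ x ∧ x < n ∧ 0 ≤ y ∧ y < n ∧ pvMget m x y = s then
        loopB m n s f ((x, y + 1) :: (x + 1, y) :: (x, y - 1) :: (x - 1, y) :: stack)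
          (PySem.Set.add vis (x, y)) (g ++ [(x, y)])
      else loopB m n s f stack vis g := rfl

-- row-level: setting an entry to true never increases, and (in range, previously false)
-- strictly decreases, the number of false entries
theorem rowSet_count_le (r : List Bool) (j : Nat) :
    (r.set j true).count false ≤ r.count false := by
  induction r generalizing j with
  | nil => simp
  | cons b t ih =>
    cases j with
    | zero => cases b <;> simp
    | succ j =>
      simp only [List.set_cons_succ, List.count_cons]
      have := ih j
      omega

theorem rowSet_count_lt (r : List Bool) (j : Nat) (hj : j < r.length)
    (hf : r.getD j false = false) : (r.set j true).count false < r.count false := by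
  induction r generalizing j with
  | nil => simp at hj
  | cons b t ih =>
    cases j with
    | zero =>
      simp only [List.getD_cons_zero] at hf
      subst hf
      simp
    | succ j =>
      simp only [List.length_cons, Nat.add_lt_add_iff_right] at hj
      simp only [List.getD_cons_succ] at hf
      have := ih j hj hf
      simp only [List.set_cons_succ, List.count_cons]
      omega

theorem cnt_set_le_aux : ∀ (v : List (List Bool)) (i j : Nat),
    pvCnt (v.set i ((v.getD i []).set j true)) ≤ pvCnt v := by
  intro v
  induction v with
  | nil => intro i j; simp
  | cons r t ih =>
    intro i j
    cases i with
    | zero =>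
      simp only [List.getD_cons_zero, List.set_cons_zero, pvCnt, List.map_cons, List.sum_cons]
      have := rowSet_count_le r j
      omega
    | succ i =>
      simp only [List.getD_cons_succ, List.set_cons_succ, pvCnt, List.map_cons, List.sum_cons]
      have := ih i j
      simp only [pvCnt] at this
      omega

theorem cnt_vset_le (v : List (List Bool)) (x y : Int) :
    pvCnt (pvVset v x y) ≤ pvCnt v := cnt_set_le_aux v x.toNat y.toNat

theorem cnt_vset_lt (v : List (List Bool)) (x y : Int)
    (hx : x.toNat < v.length) (hy : y.toNat < (v.getD x.toNat []).length)
    (hf : pvVget v x y = false) : pvCnt (pvVset v x y) < pvCnt v := by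
  unfold pvVset
  unfold pvVget at hf
  generalize x.toNat = i at *
  generalize y.toNat = j at *
  induction v generalizing i with
  | nil => simp at hx
  | cons r t ih =>
    cases i with
    | zero =>
      simp only [List.getD_cons_zero] at hf hy
      simp only [List.getD_cons_zero, List.set_cons_zero, pvCnt, List.map_cons, List.sum_cons]
      have := rowSet_count_lt r j hy hf
      omega
    | succ i =>
      simp only [List.length_cons, Nat.add_lt_add_iff_right] at hx
      simp only [List.getD_cons_succ] at hf hy
      have := ih i hx hy hf
      simp only [List.getD_cons_succ, List.set_cons_succ, pvCnt, List.map_cons, List.sum_cons]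
      simp only [pvCnt] at this
      omega

theorem vok_vset (nn : Nat) (v : List (List Bool)) (x y : Int) (h : pvVOK nn v) :
    pvVOK nn (pvVset v x y) := by
  obtain ⟨hl, hr⟩ := h
  by_cases hi : x.toNat < v.length
  · refine ⟨by simp [pvVset, hl], ?_⟩
    intro r hmem
    rcases List.mem_or_eq_of_mem_set hmem with hm | rfl
    · exact hr r hm
    · rw [List.length_set, List.getD_eq_getElem _ _ hi]
      exact hr _ (List.getElem_mem hi)
  · unfold pvVset
    rw [List.set_eq_of_length_le (by omega)]
    exact ⟨hl, hr⟩

theorem cnt_vset_lt' (nn : Nat) (v : List (List Bool)) (x y : Int) (h : pvVOK nn v)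
    (hx0 : 0 ≤ x) (hx : x < (nn : Int)) (hy0 : 0 ≤ y) (hy : y < (nn : Int))
    (hf : pvVget v x y = false) : pvCnt (pvVset v x y) < pvCnt v := by
  obtain ⟨hl, hr⟩ := h
  have hx' : x.toNat < v.length := by omega
  have hrow : (v.getD x.toNat []).length = nn := by
    rw [List.getD_eq_getElem _ _ hx']
    exact hr _ (List.getElem_mem hx')
  exact cnt_vset_lt v x y hx' (by omega) hf

theorem cnt_le_aux (nn : Nat) : ∀ (v : List (List Bool)), (∀ r ∈ v, r.length = nn) →
    pvCnt v ≤ v.length * nn := by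
  intro v
  induction v with
  | nil => simp [pvCnt]
  | cons r t ih =>
    intro hr
    simp only [pvCnt, List.map_cons, List.sum_cons, List.length_cons]
    have h1 : r.count false ≤ r.length := List.count_le_length
    have h2 : r.length = nn := hr r (by simp)
    have h3 := ih (fun r hm => hr r (by simp [hm]))
    simp only [pvCnt] at h3
    nlinarith

theorem cnt_le_sq (nn : Nat) (v : List (List Bool)) (h : pvVOK nn v) :
    pvCnt v ≤ nn * nn := by
  obtain ⟨hl, hr⟩ := h
  have := cnt_le_aux nn v hr
  rw [hl] at this
  exact this

-- reading a cell of the visited matrix after marking one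
theorem vget_vset_self (nn : Nat) (v : List (List Bool)) (x y : Int) (hv : pvVOK nn v)
    (hx : x.toNat < nn) (hy : y.toNat < nn) : pvVget (pvVset v x y) x y = true := by
  obtain ⟨hl, hr⟩ := hv
  have hx' : x.toNat < v.length := by omega
  have hrow : (v.getD x.toNat []).length = nn := by
    rw [List.getD_eq_getElem _ _ hx']
    exact hr _ (List.getElem_mem hx')
  unfold pvVget pvVset
  have h1 : (v.set x.toNat ((v.getD x.toNat []).set y.toNat true)).getD x.toNat []
      = (v.getD x.toNat []).set y.toNat true := by
    rw [List.getD_eq_getElem _ _ (by rw [List.length_set]; exact hx'),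
      List.getElem_set_self (by rw [List.length_set]; exact hx')]
  rw [h1, List.getD_eq_getElem _ _ (by rw [List.length_set, hrow]; exact hy),
    List.getElem_set_self (by rw [List.length_set, hrow]; exact hy)]

theorem vget_vset_ne (v : List (List Bool)) (x y a b : Int)
    (h : x.toNat ≠ a.toNat ∨ y.toNat ≠ b.toNat) :
    pvVget (pvVset v x y) a b = pvVget v a b := by
  unfold pvVget pvVset
  rcases h with h | h
  · have h1 : (v.set x.toNat ((v.getD x.toNat []).set y.toNat true)).getD a.toNat []
        = v.getD a.toNat [] := by
      simp only [List.getD_eq_getElem?_getD, List.getElem?_set_ne h]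
    rw [h1]
  · by_cases hxa : x.toNat = a.toNat
    · rw [hxa]
      by_cases hlen : a.toNat < v.length
      · have h1 : (v.set a.toNat ((v.getD a.toNat []).set y.toNat true)).getD a.toNat []
            = (v.getD a.toNat []).set y.toNat true := by
          rw [List.getD_eq_getElem _ _ (by rw [List.length_set]; exact hlen),
            List.getElem_set_self (by rw [List.length_set]; exact hlen),
            List.getD_eq_getElem _ _ hlen]
        rw [h1]
        simp only [List.getD_eq_getElem?_getD, List.getElem?_set_ne h]
      · rw [List.set_eq_of_length_le (by omega)]
    · have h1 : (v.set x.toNat ((v.getD x.toNat []).set y.toNat true)).getD a.toNat []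
          = v.getD a.toNat [] := by
        simp only [List.getD_eq_getElem?_getD, List.getElem?_set_ne hxa]
      rw [h1]

theorem vget_init (nn : Nat) (x y : Int) :
    pvVget (List.replicate nn (List.replicate nn false)) x y = false := by
  unfold pvVget
  have h1 : (List.replicate nn (List.replicate nn false)).getD x.toNat []
        = List.replicate nn false ∨
      (List.replicate nn (List.replicate nn false)).getD x.toNat [] = [] := by
    rcases lt_or_ge x.toNat nn with h | h
    · left
      rw [List.getD_eq_getElem _ _ (by rw [List.length_replicate]; exact h),
        List.getElem_replicate]
    · right
      rw [List.getD_eq_default _ _ (by rw [List.length_replicate]; exact h)]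
  rcases h1 with h1 | h1 <;> rw [h1]
  · rcases lt_or_ge y.toNat nn with h2 | h2
    · rw [List.getD_eq_getElem _ _ (by rw [List.length_replicate]; exact h2),
        List.getElem_replicate]
    · rw [List.getD_eq_default _ _ (by rw [List.length_replicate]; exact h2)]
  · simp

theorem rel_init (nn : Nat) :
    pvRel nn (List.replicate nn (List.replicate nn false)) PySem.Set.empty := by
  intro x y
  simp [PySem.Set.empty, vget_init]

theorem rel_add (nn : Nat) (v : List (List Bool)) (S : PySem.Set (Int × Int)) (x y : Int)
    (hrel : pvRel nn v S) (hv : pvVOK nn v)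
    (hx0 : 0 ≤ x) (hx : x < (nn : Int)) (hy0 : 0 ≤ y) (hy : y < (nn : Int)) :
    pvRel nn (pvVset v x y) (PySem.Set.add S (x, y)) := by
  intro a b
  rw [PySem.Set.mem_add, hrel a b]
  by_cases hab : a = x ∧ b = y
  · obtain ⟨rfl, rfl⟩ := hab
    have := vget_vset_self nn v a b hv (by omega) (by omega)
    simp [this, hx0, hx, hy0, hy]
  · have hne : (a, b) ≠ (x, y) := by
      intro hcontra
      exact hab ⟨congrArg Prod.fst hcontra, congrArg Prod.snd hcontra⟩
    by_cases hbnd : 0 ≤ a ∧ a < (nn : Int) ∧ 0 ≤ b ∧ b < (nn : Int)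
    · obtain ⟨ha0, ha1, hb0, hb1⟩ := hbnd
      have htn : x.toNat ≠ a.toNat ∨ y.toNat ≠ b.toNat := by
        rcases not_and_or.mp hab with h | h
        · left; omega
        · right; omega
      rw [vget_vset_ne v x y a b htn]
      simp [hne]
    · constructor
      · rintro (h | heq)
        · exact (hbnd ⟨h.1, h.2.1, h.2.2.1, h.2.2.2.1⟩).elim
        · have ha : a = x := congrArg Prod.fst heq
          have hb : b = y := congrArg Prod.snd heq
          exact (hbnd ⟨by omega, by omega, by omega, by omega⟩).elim
      · intro h
        exact (hbnd ⟨h.1, h.2.1, h.2.2.1, h.2.2.2.1⟩).elim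

-- dfs (and its direction fold) never unmark cells: the measure is monotone, well-formedness kept
theorem go_mono_aux (m : List (List String)) (n : Int) (s : String) (nn : Nat) (f : Nat)
    (H : ∀ (x y : Int) (v : List (List Bool)) (g : List (Int × Int)), pvVOK nn v →
      pvVOK nn (dfsA m n s f x y v g).1 ∧ pvCnt (dfsA m n s f x y v g).1 ≤ pvCnt v) :
    ∀ (ds : List (Int × Int)) (x y : Int) (st : List (List Bool) × List (Int × Int)),
      pvVOK nn st.1 →
      pvVOK nn (goA m n s f ds x y st).1 ∧ pvCnt (goA m n s f ds x y st).1 ≤ pvCnt st.1 := by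
  intro ds
  induction ds with
  | nil => intro x y st h; rw [goA_nil]; exact ⟨h, le_refl _⟩
  | cons d ds ih =>
    intro x y st h
    rw [goA_cons]
    split
    · obtain ⟨h1, h2⟩ := H (x + d.1) (y + d.2) st.1 st.2 h
      obtain ⟨h3, h4⟩ := ih x y _ h1
      exact ⟨h3, h4.trans h2⟩
    · exact ih x y st h

theorem dfs_mono (m : List (List String)) (n : Int) (s : String) (nn : Nat) :
    ∀ (f : Nat) (x y : Int) (v : List (List Bool)) (g : List (Int × Int)), pvVOK nn v →
      pvVOK nn (dfsA m n s f x y v g).1 ∧ pvCnt (dfsA m n s f x y v g).1 ≤ pvCnt v := by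
  intro f
  induction f with
  | zero => intro x y v g h; exact ⟨h, le_refl _⟩
  | succ f ih =>
    intro x y v g h
    rw [dfsA_succ]
    obtain ⟨h1, h2⟩ := go_mono_aux m n s nn f ih pvDirs x y (pvVset v x y, g ++ [(x, y)])
      (vok_vset nn v x y h)
    exact ⟨h1, h2.trans (cnt_vset_le v x y)⟩

theorem go_mono (m : List (List String)) (n : Int) (s : String) (nn : Nat) (f : Nat) :
    ∀ (ds : List (Int × Int)) (x y : Int) (st : List (List Bool) × List (Int × Int)),
      pvVOK nn st.1 →
      pvVOK nn (goA m n s f ds x y st).1 ∧ pvCnt (goA m n s f ds x y st).1 ≤ pvCnt st.1 :=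
  go_mono_aux m n s nn f (dfs_mono m n s nn f)

-- the group list only grows, and a started dfs records its start cell first
theorem go_pref_aux (m : List (List String)) (n : Int) (s : String) (f : Nat)
    (H : ∀ (x y : Int) (v : List (List Bool)) (g : List (Int × Int)),
      ∃ t, (dfsA m n s f x y v g).2 = g ++ t) :
    ∀ (ds : List (Int × Int)) (x y : Int) (st : List (List Bool) × List (Int × Int)),
      ∃ t, (goA m n s f ds x y st).2 = st.2 ++ t := by
  intro ds
  induction ds with
  | nil => intro x y st; exact ⟨[], by simp [goA_nil]⟩
  | cons d ds ih =>
    intro x y st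
    rw [goA_cons]
    split
    · obtain ⟨t1, ht1⟩ := H (x + d.1) (y + d.2) st.1 st.2
      obtain ⟨t2, ht2⟩ := ih x y (dfsA m n s f (x + d.1) (y + d.2) st.1 st.2)
      exact ⟨t1 ++ t2, by rw [ht2, ht1, List.append_assoc]⟩
    · exact ih x y st

theorem dfs_pref (m : List (List String)) (n : Int) (s : String) :
    ∀ (f : Nat) (x y : Int) (v : List (List Bool)) (g : List (Int × Int)),
      ∃ t, (dfsA m n s f x y v g).2 = g ++ t := by
  intro f
  induction f with
  | zero => intro x y v g; exact ⟨[], by simp [dfsA]⟩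
  | succ f ih =>
    intro x y v g
    rw [dfsA_succ]
    obtain ⟨t, ht⟩ := go_pref_aux m n s f ih pvDirs x y (pvVset v x y, g ++ [(x, y)])
    exact ⟨(x, y) :: t, by rw [ht]; simp⟩

theorem dfs_ne_nil (m : List (List String)) (n : Int) (s : String) (f : Nat) (x y : Int)
    (v : List (List Bool)) : (dfsA m n s (f + 1) x y v []).2 ≠ [] := by
  rw [dfsA_succ]
  obtain ⟨t, ht⟩ := go_pref_aux m n s f (dfs_pref m n s f) pvDirs x y
    (pvVset v x y, [] ++ [(x, y)])
  rw [ht]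
  simp

theorem map_dirs (a b : Int) :
    pvDirs.map (fun d => (a + d.1, b + d.2)) = [(a, b + 1), (a + 1, b), (a, b - 1), (a - 1, b)] := by
  simp [pvDirs, sub_eq_add_neg]

-- B's loop is fuel-indifferent once the fuel covers stack size plus 4 per unvisited related cell
theorem loopB_stab (m : List (List String)) (nn : Nat) (s : String) :
    ∀ (f f' : Nat) (stack : List (Int × Int)) (vis : PySem.Set (Int × Int))
      (g : List (Int × Int)) (v : List (List Bool)), pvVOK nn v → pvRel nn v vis →
      stack.length + 4 * pvCnt v ≤ f → stack.length + 4 * pvCnt v ≤ f' →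
      loopB m (nn : Int) s f stack vis g = loopB m (nn : Int) s f' stack vis g := by
  intro f
  induction f using Nat.strong_induction_on with
  | _ f IH =>
    intro f' stack vis g v hv hrel h1 h2
    match stack with
    | [] => rw [loopB_nil, loopB_nil]
    | (x, y) :: rest =>
      simp only [List.length_cons] at h1 h2
      obtain ⟨f1, rfl⟩ : ∃ f1, f = f1 + 1 := ⟨f - 1, by omega⟩
      obtain ⟨f1', rfl⟩ : ∃ f1', f' = f1' + 1 := ⟨f' - 1, by omega⟩
      rw [loopB_cons, loopB_cons]
      split
      · exact IH f1 (by omega) f1' _ _ _ v hv hrel (by omega) (by omega)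
      · next hmem =>
        split
        · next hC =>
          obtain ⟨hx0, hx1, hy0, hy1, _⟩ := hC
          have hvg : pvVget v x y = false := by
            by_contra hcon
            exact hmem (((hrel x y).mpr ⟨hx0, hx1, hy0, hy1, by simpa using hcon⟩))
          have hlt := cnt_vset_lt' nn v x y hv hx0 hx1 hy0 hy1 hvg
          refine IH f1 (by omega) f1' _ _ _ (pvVset v x y) (vok_vset nn v x y hv)
            (rel_add nn v vis x y hrel hv hx0 hx1 hy0 hy1) ?_ ?_ <;>
            · simp only [List.length_cons]; omega
        · exact IH f1 (by omega) f1' _ _ _ v hv hrel (by omega) (by omega)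

-- CORE: popping the pending neighbour images of a direction suffix ds equals running the
-- recursive dfs's fold over ds and continuing with the rest of the stack, with the visited
-- set tracking A's visited matrix throughout
theorem sim (m : List (List String)) (nn : Nat) (s : String) :
    ∀ (k : Nat) (v : List (List Bool)), pvCnt v = k → pvVOK nn v →
    ∀ (S : PySem.Set (Int × Int)), pvRel nn v S →
    ∀ (x y : Int) (ds : List (Int × Int)) (g rest : List (Int × Int)) (f fL : Nat),
      pvCnt v < f →
      ds.length + rest.length + 4 * k ≤ fL →
      ∃ S' : PySem.Set (Int × Int),
        pvRel nn (goA m (nn : Int) s f ds x y (v, g)).1 S' ∧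
        ∀ fL', rest.length + 4 * pvCnt (goA m (nn : Int) s f ds x y (v, g)).1 ≤ fL' →
          loopB m (nn : Int) s fL (ds.map (fun d => (x + d.1, y + d.2)) ++ rest) S g
            = loopB m (nn : Int) s fL' rest S' (goA m (nn : Int) s f ds x y (v, g)).2 := by
  intro k
  induction k using Nat.strong_induction_on with
  | _ k IH =>
    intro v hk hv S hrel x y ds
    induction ds with
    | nil =>
      intro g rest f fL hf h1
      rw [goA_nil]
      refine ⟨S, hrel, ?_⟩
      intro fL' h2
      simp only [List.map_nil, List.nil_append]
      exact loopB_stab m nn s fL fL' rest S g v hv hrel (by simp at h1 ⊢; omega) (by omega)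
    | cons d ds ih =>
      intro g rest f fL hf h1
      simp only [List.length_cons] at h1
      obtain ⟨fl, rfl⟩ : ∃ fl, fL = fl + 1 := ⟨fL - 1, by omega⟩
      simp only [List.map_cons, List.cons_append]
      rw [loopB_cons]
      by_cases hC : (0 ≤ x + d.1 ∧ x + d.1 < (nn : Int) ∧ 0 ≤ y + d.2 ∧ y + d.2 < (nn : Int)) ∧
          pvVget v (x + d.1) (y + d.2) = false ∧ pvMget m (x + d.1) (y + d.2) = s
      · obtain ⟨⟨hx0, hx1, hy0, hy1⟩, hvg, hs⟩ := hC
        have hmem : (x + d.1, y + d.2) ∉ S := by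
          intro hcon
          have := ((hrel _ _).mp hcon).2.2.2.2
          rw [hvg] at this
          exact Bool.false_ne_true this
        rw [if_neg hmem,
          if_pos (show (0 ≤ x + d.1 ∧ x + d.1 < (nn : Int) ∧ 0 ≤ y + d.2 ∧ y + d.2 < (nn : Int) ∧
            pvMget m (x + d.1) (y + d.2) = s) from ⟨hx0, hx1, hy0, hy1, hs⟩)]
        rw [goA_cons, if_pos ⟨⟨hx0, hx1, hy0, hy1⟩, hvg, hs⟩]
        obtain ⟨f1, rfl⟩ : ∃ f1, f = f1 + 1 := ⟨f - 1, by omega⟩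
        have hk' : pvCnt (pvVset v (x + d.1) (y + d.2)) < k := by
          rw [← hk]; exact cnt_vset_lt' nn v _ _ hv hx0 hx1 hy0 hy1 hvg
        have hv' := vok_vset nn v (x + d.1) (y + d.2) hv
        have hrel' := rel_add nn v S (x + d.1) (y + d.2) hrel hv hx0 hx1 hy0 hy1
        dsimp only
        rw [dfsA_succ]
        have hlt1 : pvCnt (pvVset v (x + d.1) (y + d.2)) < f1 := by omega
        obtain ⟨hvok1, hle1⟩ := go_mono m (nn : Int) s nn f1 pvDirs (x + d.1) (y + d.2)
          (pvVset v (x + d.1) (y + d.2), g ++ [(x + d.1, y + d.2)]) hv'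
        set st1 := goA m (nn : Int) s f1 pvDirs (x + d.1) (y + d.2)
          (pvVset v (x + d.1) (y + d.2), g ++ [(x + d.1, y + d.2)]) with hst1
        dsimp only at hle1
        obtain ⟨S1, hrelS1, heq1⟩ := IH (pvCnt (pvVset v (x + d.1) (y + d.2))) hk' _ rfl hv'
          (PySem.Set.add S (x + d.1, y + d.2)) hrel' (x + d.1) (y + d.2) pvDirs
          (g ++ [(x + d.1, y + d.2)]) (List.map (fun d => (x + d.1, y + d.2)) ds ++ rest) f1 fl
          hlt1
          (by simp only [pvDirs, List.length_cons, List.length_nil, List.length_append,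
                List.length_map]; omega)
        have heq1' := heq1 (ds.length + rest.length + 4 * pvCnt st1.1)
          (by simp only [List.length_append, List.length_map, ← hst1]; omega)
        rw [map_dirs] at heq1'
        simp only [List.cons_append, List.nil_append] at heq1'
        rw [heq1']
        obtain ⟨S2, hrelS2, heq2⟩ := IH (pvCnt st1.1) (by omega) st1.1 rfl hvok1 S1
          (by rw [← hst1] at hrelS1; exact hrelS1) x y ds st1.2 rest (f1 + 1)
          (ds.length + rest.length + 4 * pvCnt st1.1) (by omega) (le_refl _)
        rw [Prod.mk.eta] at hrelS2 heq2
        exact ⟨S2, hrelS2, fun fL' hb => by rw [heq2 fL' hb]⟩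
      · rw [goA_cons, if_neg hC]
        by_cases hmem : (x + d.1, y + d.2) ∈ S
        · rw [if_pos hmem]
          exact ih g rest f fl hf (by omega)
        · rw [if_neg hmem]
          rw [if_neg ?hBc]
          case hBc =>
            rintro ⟨hx0, hx1, hy0, hy1, hs⟩
            have hvg : pvVget v (x + d.1) (y + d.2) = false := by
              by_contra hcon
              exact hmem ((hrel _ _).mpr ⟨hx0, hx1, hy0, hy1, by simpa using hcon⟩)
            exact hC ⟨⟨hx0, hx1, hy0, hy1⟩, hvg, hs⟩
          exact ih g rest f fl hf (by omega)

-- one start cell: B's stack loop computes exactly A's dfs group, and the final visited set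
-- tracks A's final visited matrix
theorem cell_eq (m : List (List String)) (nn : Nat) (i j : Nat) (hi : i < nn) (hj : j < nn)
    (v : List (List Bool)) (S : PySem.Set (Int × Int)) (hv : pvVOK nn v) (hrel : pvRel nn v S)
    (hij : pvVget v (i : Int) (j : Int) = false) :
    ∃ S' : PySem.Set (Int × Int),
      loopB m (nn : Int) (pvMget m (i : Int) (j : Int)) (4 * nn * nn + 1) [((i : Int), (j : Int))] S []
        = (S', (dfsA m (nn : Int) (pvMget m (i : Int) (j : Int)) (nn * nn + 1) (i : Int) (j : Int) v []).2)
      ∧ pvRel nn (dfsA m (nn : Int) (pvMget m (i : Int) (j : Int)) (nn * nn + 1) (i : Int) (j : Int) v []).1 S' := by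
  have hcnt := cnt_le_sq nn v hv
  have hi' : (0 : Int) ≤ (i : Int) ∧ (i : Int) < (nn : Int) := ⟨by omega, by exact_mod_cast hi⟩
  have hj' : (0 : Int) ≤ (j : Int) ∧ (j : Int) < (nn : Int) := ⟨by omega, by exact_mod_cast hj⟩
  have hlt : pvCnt (pvVset v (i : Int) (j : Int)) < pvCnt v :=
    cnt_vset_lt' nn v _ _ hv hi'.1 hi'.2 hj'.1 hj'.2 hij
  have hmem : ((i : Int), (j : Int)) ∉ S := by
    intro hcon
    have := ((hrel _ _).mp hcon).2.2.2.2
    rw [hij] at this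
    exact Bool.false_ne_true this
  rw [dfsA_succ, loopB_cons, if_neg hmem,
    if_pos (show (0 ≤ (i : Int) ∧ (i : Int) < (nn : Int) ∧ 0 ≤ (j : Int) ∧ (j : Int) < (nn : Int) ∧
      pvMget m (i : Int) (j : Int) = pvMget m (i : Int) (j : Int)) from
      ⟨hi'.1, hi'.2, hj'.1, hj'.2, rfl⟩)]
  obtain ⟨S', hrel', heq⟩ := sim m nn (pvMget m (i : Int) (j : Int))
    (pvCnt (pvVset v (i : Int) (j : Int))) (pvVset v (i : Int) (j : Int)) rfl
    (vok_vset nn v _ _ hv) (PySem.Set.add S ((i : Int), (j : Int)))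
    (rel_add nn v S _ _ hrel hv hi'.1 hi'.2 hj'.1 hj'.2) (i : Int) (j : Int) pvDirs
    ([] ++ [((i : Int), (j : Int))]) [] (nn * nn) (4 * nn * nn)
    (by omega)
    (by simp only [pvDirs, List.length_cons, List.length_nil]
        have h4 : 4 * nn * nn = 4 * (nn * nn) := by ring
        omega)
  have heq' := heq (4 * pvCnt (goA m (nn : Int) (pvMget m (i : Int) (j : Int)) (nn * nn) pvDirs
    (i : Int) (j : Int) (pvVset v (i : Int) (j : Int), [] ++ [((i : Int), (j : Int))])).1)
    (by simp only [List.length_nil]; omega)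
  rw [List.append_nil, map_dirs] at heq'
  rw [heq', loopB_nil]
  exact ⟨S', rfl, hrel'⟩

-- two folds over the same list linked by a relation
theorem foldl_rel {α S T : Type} (R : S → T → Prop) (f : S → α → S) (g : T → α → T) :
    ∀ (l : List α) (s : S) (t : T), R s t →
      (∀ s t a, a ∈ l → R s t → R (f s a) (g t a)) →
      R (l.foldl f s) (l.foldl g t) := by
  intro l
  induction l with
  | nil => intro s t h _; exact h
  | cons a l ih =>
    intro s t h hstep
    exact ih (f s a) (g t a) (hstep s t a (by simp) h)
      (fun s t b hb => hstep s t b (by simp [hb]))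

-- flattening a fold over range(a*b) into nested folds
theorem foldl_range_mul {S : Type} (b : Nat) (f : S → Nat → S) :
    ∀ (a : Nat) (init : S),
      (List.range (a * b)).foldl f init
        = (List.range a).foldl (fun st i => (List.range b).foldl (fun st j => f st (i * b + j)) st) init := by
  intro a
  induction a with
  | zero => intro init; simp
  | succ a ih =>
    intro init
    have h : (a + 1) * b = a * b + b := by ring
    rw [h, List.range_add, List.foldl_append, ih, List.range_succ, List.foldl_append,
      List.foldl_cons, List.foldl_nil, List.foldl_map]

-- divmod recovers the nested indices
theorem divmod_cell (nn i j : Nat) (hj : j < nn) :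
    PySem.Int.floordiv ((i * nn + j : Nat) : Int) ((nn : Nat) : Int) = (i : Int) ∧
    PySem.Int.mod ((i * nn + j : Nat) : Int) ((nn : Nat) : Int) = (j : Int) := by
  rw [PySem.Int.floordiv_natCast, PySem.Int.mod_natCast]
  constructor
  · congr 1
    rw [Nat.add_comm, Nat.add_mul_div_right _ _ (show 0 < nn by omega), Nat.div_eq_of_lt hj]
    omega
  · congr 1
    rw [Nat.add_comm, Nat.add_mul_mod_self_right, Nat.mod_eq_of_lt hj]

-- ===== VERDICT (by name: the statement is the Claim_ definition above) =====
theorem trova_gruppi_simboli_spec : Claim_equal_trova_gruppi_simboli := by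
  intro matrice _ _
  unfold Spec_trova_gruppi_simboli
  simp only [trova_gruppi_simboli, trova_gruppi_simboli_alt]
  set nn := matrice.length with hnn
  have hsq : (nn : Int) * (nn : Int) = ((nn * nn : Nat) : Int) := by push_cast; ring
  rw [hsq, PySem.List.pyRange_zero_nat, List.foldl_map, foldl_range_mul]
  refine (foldl_rel
    (fun (stA : (List (List Bool)) × (List (String × List (Int × Int))))
         (stB : (PySem.Set (Int × Int)) × (List (String × List (Int × Int)))) =>
      pvVOK nn stA.1 ∧ pvRel nn stA.1 stB.1 ∧ stA.2 = stB.2)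
    _ _ (List.range nn) _ _ ⟨?_, rel_init nn, rfl⟩ ?_).2.2
  · refine ⟨by simp, fun r hr => ?_⟩
    rw [List.eq_of_mem_replicate hr]
    simp
  · intro stA stB i hi hR
    refine foldl_rel
      (fun (stA : (List (List Bool)) × (List (String × List (Int × Int))))
           (stB : (PySem.Set (Int × Int)) × (List (String × List (Int × Int)))) =>
        pvVOK nn stA.1 ∧ pvRel nn stA.1 stB.1 ∧ stA.2 = stB.2)
      _ _ (List.range nn) stA stB hR ?_
    intro stA stB j hj hR
    have hi' : i < nn := List.mem_range.mp hi
    have hj' : j < nn := List.mem_range.mp hj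
    obtain ⟨hdiv, hmod⟩ := divmod_cell nn i j hj'
    obtain ⟨hvok, hrel, hout⟩ := hR
    simp only [hdiv, hmod]
    by_cases hvis : pvVget stA.1 (i : Int) (j : Int) = false
    · rw [if_pos hvis]
      have hmem : ((i : Int), (j : Int)) ∉ stB.1 := by
        intro hcon
        have := ((hrel _ _).mp hcon).2.2.2.2
        rw [hvis] at this
        exact Bool.false_ne_true this
      rw [if_neg hmem]
      obtain ⟨S', heq, hrel'⟩ := cell_eq matrice nn i j hi' hj' stA.1 stB.1 hvok hrel hvis
      rw [heq]
      rw [if_neg (dfs_ne_nil matrice (nn : Int) (pvMget matrice (i : Int) (j : Int))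
        (nn * nn) (i : Int) (j : Int) stA.1)]
      exact ⟨(dfs_mono matrice (nn : Int) (pvMget matrice (i : Int) (j : Int)) nn
        (nn * nn + 1) (i : Int) (j : Int) stA.1 [] hvok).1, hrel', by rw [hout]⟩
    · rw [if_neg hvis]
      have hmem : ((i : Int), (j : Int)) ∈ stB.1 := (hrel _ _).mpr
        ⟨by omega, by exact_mod_cast hi', by omega, by exact_mod_cast hj', by simpa using hvis⟩
      rw [if_pos hmem]
      exact ⟨hvok, hrel, hout⟩
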